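-- pv_equiv track=rewrite | github.com/MNico99/Sintaxis-TP02 | automatas.py | A_Num
-- ===== SOURCE A (Python) =====
-- TRAMPA = -1
--
-- RESULTADO_ACEPTADO = "ACEPTADO"
--
-- RESULTADO_TRAMPA = "TRAMPA"
--
-- RESULTADO_NO_ACEPTADO = "NO_ACEPTADO"
--
-- digito = ["0", "1", "2", "3", "4", "5", "6", "7", "8", "9"]
--
-- def d_Num(estado_anterior, caracter):
--     if estado_anterior == 0 and caracter in digito:
--         return 1
--     if estado_anterior == 1 and caracter in digito:
--         return 1
--     if estado_anterior == 1 and caracter == ".":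
--         return 2
--     if estado_anterior == 2 and caracter in digito:
--         return 3
--     if estado_anterior == 3 and caracter in digito:
--         return 3
--
--
--     return TRAMPA
--
-- def A_Num(cadena):
--     Finales = [1, 3]
--     estado_actual = 0
--
--     for caracter in cadena:
--         estado_proximo = d_Num(estado_actual, caracter)
--         if estado_proximo == TRAMPA:
--             return RESULTADO_TRAMPA
--         estado_actual = estado_proximo
--
--     if estado_actual in Finales:
--         return RESULTADO_ACEPTADO
--     else:
--         return RESULTADO_NO_ACEPTADO
-- ===== SOURCE B (Python) =====
-- def A_Num(cadena):
--     if cadena == "":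
--         return "NO_ACEPTADO"
--     digits = "0123456789"
--     head, sep, tail = cadena.partition(".")
--     if sep == "":
--         return "ACEPTADO" if all(c in digits for c in head) else "TRAMPA"
--     if head != "" and all(c in digits for c in head):
--         if tail == "":
--             return "NO_ACEPTADO"
--         if all(c in digits for c in tail):
--             return "ACEPTADO"
--     return "TRAMPA"
-- ===== Notes on version B (the rewrite author's own statement) =====
-- stated objective: simpler
-- what changed: Replaced the explicit DFA state loop and transition table with a single partition at the first dot plus all-digit checks on the two parts.
import Mathlib
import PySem

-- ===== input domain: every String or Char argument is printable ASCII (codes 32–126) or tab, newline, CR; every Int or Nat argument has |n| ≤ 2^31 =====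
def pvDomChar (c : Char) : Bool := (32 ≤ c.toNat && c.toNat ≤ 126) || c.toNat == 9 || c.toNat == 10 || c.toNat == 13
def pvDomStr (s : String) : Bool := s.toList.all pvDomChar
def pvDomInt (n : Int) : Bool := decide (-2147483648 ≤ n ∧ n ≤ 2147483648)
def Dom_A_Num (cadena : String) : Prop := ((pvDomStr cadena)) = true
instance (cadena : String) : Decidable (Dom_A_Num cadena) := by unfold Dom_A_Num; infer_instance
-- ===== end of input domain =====

-- B replaces the DFA state loop with a partition at the first dot plus all-digit checks (simpler).

-- ===== PORT A =====
-- digito: Python's list of one-character digit strings; characters iterated from a string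
-- are one-character strings in Python, so membership is ported as Char membership (exact).
def digito : List Char := ['0', '1', '2', '3', '4', '5', '6', '7', '8', '9']

def d_Num (estado_anterior : Int) (caracter : Char) : Int :=
  if estado_anterior = 0 ∧ digito.contains caracter then 1
  else if estado_anterior = 1 ∧ digito.contains caracter then 1
  else if estado_anterior = 1 ∧ caracter = '.' then 2
  else if estado_anterior = 2 ∧ digito.contains caracter then 3
  else if estado_anterior = 3 ∧ digito.contains caracter then 3
  else -1

-- the for-loop with its early return, as structural recursion over the same state
def aNumLoop (estado_actual : Int) (cs : List Char) : String :=
  match cs with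
  | [] => if ([1, 3] : List Int).contains estado_actual then "ACEPTADO" else "NO_ACEPTADO"
  | caracter :: rest =>
    let estado_proximo := d_Num estado_actual caracter
    if estado_proximo = -1 then "TRAMPA" else aNumLoop estado_proximo rest

def A_Num (cadena : String) : String := aNumLoop 0 cadena.toList

-- ===== PORT B =====
def bAllDigits (cs : List Char) : Bool := cs.all (fun c => ("0123456789".toList).contains c)

-- cadena.partition(".") is ported as the (takeWhile, dropWhile) split at the first '.'
def A_Num_alt (cadena : String) : String :=
  let cs := cadena.toList
  if cs = [] then "NO_ACEPTADO"
  else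
    let head := cs.takeWhile (fun c => c ≠ '.')
    let rest := cs.dropWhile (fun c => c ≠ '.')
    match rest with
    | [] => if bAllDigits head then "ACEPTADO" else "TRAMPA"
    | _ :: tail =>
      if head ≠ [] ∧ bAllDigits head then
        if tail = [] then "NO_ACEPTADO"
        else if bAllDigits tail then "ACEPTADO" else "TRAMPA"
      else "TRAMPA"

-- ===== PRECONDITION & SPEC =====
def Spec_A_Num (cadena : String) (out : String) : Prop := out = A_Num_alt cadena
instance (cadena : String) (out : String) : Decidable (Spec_A_Num cadena out) := by unfold Spec_A_Num; infer_instance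

-- ===== CLAIM (what is proved, stated in full; the proofs are below) =====
def Claim_equal_A_Num : Prop := ∀ (cadena : String), Dom_A_Num cadena → Spec_A_Num cadena (A_Num cadena)

-- ===== LEMMAS AND PROOFS =====

theorem diglist_eq : "0123456789".toList = digito := rfl

theorem mem_digito_ne_dot : ∀ c ∈ digito, c ≠ '.' := by
  intro c hc; fin_cases hc <;> decide

theorem bAllDigits_nil : bAllDigits [] = true := rfl

theorem bAllDigits_cons (c : Char) (cs : List Char) :
    bAllDigits (c :: cs) = (digito.contains c && bAllDigits cs) := by
  simp only [bAllDigits, List.all_cons, diglist_eq]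

theorem loop3 (cs : List Char) :
    aNumLoop 3 cs = (if bAllDigits cs then "ACEPTADO" else "TRAMPA") := by
  induction cs with
  | nil => rfl
  | cons c r ih =>
    by_cases h : digito.contains c = true
    · simp only [aNumLoop, d_Num, h, bAllDigits_cons]
      norm_num
      exact ih
    · simp only [aNumLoop, d_Num, h, bAllDigits_cons]
      norm_num [h]

theorem loop2 (cs : List Char) :
    aNumLoop 2 cs = (match cs with
      | [] => "NO_ACEPTADO"
      | _ => if bAllDigits cs then "ACEPTADO" else "TRAMPA") := by
  cases cs with
  | nil => rfl
  | cons c r =>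
    by_cases h : digito.contains c = true
    · simp only [aNumLoop, d_Num, h, bAllDigits_cons]
      norm_num
      exact loop3 r
    · simp only [aNumLoop, d_Num, h, bAllDigits_cons]
      norm_num [h]

def state1val (cs : List Char) : String :=
  let head := cs.takeWhile (fun c => c ≠ '.')
  let rest := cs.dropWhile (fun c => c ≠ '.')
  if bAllDigits head then
    match rest with
    | [] => "ACEPTADO"
    | _ :: tail =>
      if tail = [] then "NO_ACEPTADO"
      else if bAllDigits tail then "ACEPTADO" else "TRAMPA"
  else "TRAMPA"

theorem loop1 (cs : List Char) : aNumLoop 1 cs = state1val cs := by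
  induction cs with
  | nil => rfl
  | cons c r ih =>
    by_cases hd : digito.contains c = true
    · have hmem : c ∈ digito := by simpa using hd
      have hne : c ≠ '.' := mem_digito_ne_dot c hmem
      have h1 : aNumLoop 1 (c :: r) = aNumLoop 1 r := by
        simp [aNumLoop, d_Num, hmem]
      rw [h1, ih]
      simp [state1val, hne, bAllDigits_cons, hmem]
    · by_cases hp : c = '.'
      · subst hp
        simp only [aNumLoop, d_Num, hd, state1val, List.takeWhile_cons, List.dropWhile_cons]
        norm_num [loop2, bAllDigits_nil]
        cases r <;> simp
      · have hmem : c ∉ digito := by simpa using hd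
        simp [aNumLoop, d_Num, hp, state1val, bAllDigits_cons, hmem]

-- ===== VERDICT (by name: the statement is the Claim_ definition above) =====
theorem A_Num_spec : Claim_equal_A_Num := by
  intro cadena _
  unfold Spec_A_Num A_Num A_Num_alt
  cases hcs : cadena.toList with
  | nil => rfl
  | cons c r =>
    by_cases hd : digito.contains c = true
    · have hmem : c ∈ digito := by simpa using hd
      have hne : c ≠ '.' := mem_digito_ne_dot c hmem
      have h1 : aNumLoop 0 (c :: r) = aNumLoop 1 r := by
        simp [aNumLoop, d_Num, hmem]
      rw [h1, loop1]
      simp [state1val, hne, bAllDigits_cons, hmem]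
      cases r.dropWhile (fun c => !decide (c = '.')) <;> simp
    · by_cases hp : c = '.'
      · subst hp
        simp only [aNumLoop, d_Num, hd, List.takeWhile_cons, List.dropWhile_cons]
        norm_num
        simp
      · have hmem : c ∉ digito := by simpa using hd
        simp [aNumLoop, d_Num, hp, bAllDigits_cons, hmem]
        cases r.dropWhile (fun c => !decide (c = '.')) <;> simp [hmem]
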